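-- pv_equiv track=rewrite | github.com/Ankit-Ahirrao/Real_Interview_Problems | Algorithms/AnagramDifference/AnagramDifference.py | get_dif
-- ===== SOURCE A (Python) =====
-- from collections import Counter
--
-- def get_dif(word1, word2):
--     if len(word1) != len(word2): return -1
--     fre1 = Counter(word1)
--     fre2 = Counter(word2)
--     for k, v in fre2.items():
--         if k not in fre1: fre1[k] = 0
--         fre1[k] -= v
--     ret = 0
--     for k, v in fre1.items():
--         ret += abs(v)
--     return ret //2
-- ===== SOURCE B (Python) =====
-- def get_dif(word1, word2):
--     if len(word1) != len(word2): return -1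
--     rest = list(word1)
--     for c in word2:
--         if c in rest:
--             rest.remove(c)
--     return len(rest)
-- ===== Notes on version B (the rewrite author's own statement) =====
-- stated objective: alternative
-- what changed: B replaces A's Counter-difference and half-sum-of-absolute-values with multiset subtraction: it removes each character of word2 once from a list copy of word1 and returns the number of leftovers.
import Mathlib
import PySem

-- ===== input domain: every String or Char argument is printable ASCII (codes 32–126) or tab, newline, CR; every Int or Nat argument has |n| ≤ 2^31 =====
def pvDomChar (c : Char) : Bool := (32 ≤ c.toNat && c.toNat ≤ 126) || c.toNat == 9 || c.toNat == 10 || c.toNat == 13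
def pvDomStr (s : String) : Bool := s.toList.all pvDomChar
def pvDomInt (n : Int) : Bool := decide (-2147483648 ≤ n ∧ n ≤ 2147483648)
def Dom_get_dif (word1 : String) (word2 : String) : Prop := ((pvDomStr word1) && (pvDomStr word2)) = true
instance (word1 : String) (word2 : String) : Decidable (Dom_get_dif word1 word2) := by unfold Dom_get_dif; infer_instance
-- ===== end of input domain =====

-- B replaces A's Counter-difference/half-abs-sum with multiset subtraction (remove each char of
-- word2 once from a list copy of word1, count the leftovers); alternative decomposition, not faster.

-- ===== PORT A =====
def get_dif (word1 : String) (word2 : String) : Int :=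
  if PySem.Str.len word1 ≠ PySem.Str.len word2 then -1
  else
    let fre1 := PySem.Dict.counter word1.toList
    let fre2 := PySem.Dict.counter word2.toList
    let fre1 := fre2.items.foldl (fun d p =>
      let d := if d.contains p.1 then d else d.insert p.1 0
      d.insert p.1 (d.getD p.1 0 - p.2)) fre1
    let ret := fre1.items.foldl (fun r p => r + |p.2|) (0 : Int)
    PySem.Int.floordiv ret 2

-- ===== PORT B =====
def get_dif_alt (word1 : String) (word2 : String) : Int :=
  if PySem.Str.len word1 ≠ PySem.Str.len word2 then -1
  else
    let rest := word1.toList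
    let rest := word2.toList.foldl (fun rest c =>
      if rest.contains c then (PySem.List.remove? rest c).getD rest else rest) rest
    (rest.length : Int)

-- ===== PRECONDITION & SPEC =====
def Spec_get_dif (word1 : String) (word2 : String) (out : Int) : Prop := out = get_dif_alt word1 word2
instance (word1 : String) (word2 : String) (out : Int) : Decidable (Spec_get_dif word1 word2 out) := by unfold Spec_get_dif; infer_instance

-- ===== CLAIM (what is proved, stated in full; the proofs are below) =====
def Claim_equal_get_dif : Prop := ∀ (word1 : String) (word2 : String), Dom_get_dif word1 word2 → Spec_get_dif word1 word2 (get_dif word1 word2)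

-- ===== LEMMAS AND PROOFS =====

-- the ordered union of the distinct characters of the two words: exactly the final keys of A's dict
def gdKeys (w1 w2 : List Char) : List Char :=
  PySem.Set.update (PySem.Set.ofList w1) (PySem.Set.ofList w2)

lemma gdKeys_nodup (w1 w2 : List Char) : (gdKeys w1 w2).Nodup :=
  PySem.Set.nodup_update _ _ (PySem.Set.nodup_ofList _)

lemma gdKeys_mem_left (w1 w2 : List Char) {x : Char} (hx : x ∈ w1) : x ∈ gdKeys w1 w2 :=
  (PySem.Set.mem_update _ _ _).2 (Or.inl ((PySem.Set.mem_ofList _ _).2 hx))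

lemma gdKeys_mem_right (w1 w2 : List Char) {x : Char} (hx : x ∈ w2) : x ∈ gdKeys w1 w2 :=
  (PySem.Set.mem_update _ _ _).2 (Or.inr ((PySem.Set.mem_ofList _ _).2 hx))

-- B's loop body removes one occurrence when present, i.e. it is List.erase
lemma gd_stepB_eq :
    (fun (rest : List Char) (c : Char) =>
      if rest.contains c then (PySem.List.remove? rest c).getD rest else rest)
    = fun rest c => if c ∈ rest then rest.erase c else rest := by
  funext rest c
  by_cases h : c ∈ rest
  · simp [h, PySem.List.remove?_eq_some_erase rest c h]
  · simp [h]

-- counts after B's loop: truncated difference of the two words' counts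
lemma gd_countB (l : List Char) : ∀ (rest : List Char) (x : Char),
    ((l.foldl (fun rest c => if c ∈ rest then rest.erase c else rest) rest).count x)
      = rest.count x - l.count x := by
  induction l with
  | nil => simp
  | cons c l ih =>
    intro rest x
    simp only [List.foldl_cons]
    rw [ih]
    by_cases hc : c ∈ rest
    · rw [if_pos hc]
      by_cases hx : x = c
      · subst hx
        rw [List.count_erase_self, List.count_cons_self]
        omega
      · rw [List.count_erase_of_ne hx]
        have hcx : ¬c = x := fun h => hx h.symm
        simp [hcx]
    · rw [if_neg hc]
      by_cases hx : x = c
      · subst hx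
        have h0 : rest.count x = 0 := List.count_eq_zero.2 hc
        rw [h0, List.count_cons_self]
        omega
      · have hcx : ¬c = x := fun h => hx h.symm
        simp [hcx]

lemma gd_memB (l rest : List Char) (x : Char)
    (hx : x ∈ l.foldl (fun rest c => if c ∈ rest then rest.erase c else rest) rest) : x ∈ rest := by
  have h := gd_countB l rest x
  have h1 : 0 < (l.foldl (fun rest c => if c ∈ rest then rest.erase c else rest) rest).count x :=
    List.count_pos_iff.2 hx
  exact List.count_pos_iff.1 (by omega)

-- length of a list as a sum of counts over any duplicate-free superset of its elements
lemma gd_sum_count (K : List Char) (hnd : K.Nodup) :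
    ∀ (l : List Char), (∀ x ∈ l, x ∈ K) → (K.map (fun k => l.count k)).sum = l.length := by
  intro l
  induction l with
  | nil => simp
  | cons x l ih =>
    intro h
    have hx : x ∈ K := h x (List.mem_cons_self)
    have h' : ∀ y ∈ l, y ∈ K := fun y hy => h y (List.mem_cons_of_mem _ hy)
    have h1 : (K.map (fun k => (x :: l).count k))
        = K.map (fun k => l.count k + if k = x then 1 else 0) := by
      apply List.map_congr_left
      intro a _
      simp [List.count_cons]
      simp [eq_comm]
    have h2 : (K.map (fun k => if k = x then 1 else 0)).sum = 1 := by
      rw [PySem.List.sum_map_ite_one_zero_nat' (fun k => k = x) K]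
      have := List.count_eq_one_of_mem hnd hx
      simpa [List.count, List.countP] using this
    rw [h1, List.sum_map_add, ih h', h2, List.length_cons]

-- A's first loop body, simplified: missing keys hold 0, so it is a plain insert of getD - v
lemma gd_bodyA_eq :
    (fun (d : PySem.Dict Char Int) (p : Char × Int) =>
      let d := if d.contains p.1 then d else d.insert p.1 0
      d.insert p.1 (d.getD p.1 0 - p.2))
    = fun d p => d.insert p.1 (d.getD p.1 0 - p.2) := by
  funext d p
  by_cases h : d.contains p.1
  · simp [h]
  · have h0 : d.getD p.1 0 = 0 := by
      simp [PySem.Dict.getD_eq_get?_getD,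
        (PySem.Dict.get?_eq_none_iff_contains d p.1).2 (by simpa using h)]
    simp only [h, Bool.false_eq_true, if_false]
    rw [PySem.Dict.getD_insert_self, PySem.Dict.insert_insert_self, h0]

lemma gd_getD_foldA (l : List (Char × Int)) : ∀ (d : PySem.Dict Char Int) (k : Char),
    ((l.foldl (fun d p => d.insert p.1 (d.getD p.1 0 - p.2)) d).getD k 0)
      = d.getD k 0 - ((l.filter (fun p => p.1 = k)).map (·.2)).sum := by
  induction l with
  | nil => simp
  | cons p l ih =>
    intro d k
    simp only [List.foldl_cons]
    rw [ih]
    by_cases h : p.1 = k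
    · subst h
      rw [List.filter_cons_of_pos (by simp)]
      simp
      omega
    · rw [List.filter_cons_of_neg (by simpa using h)]
      rw [PySem.Dict.getD_insert, if_neg (fun hk => h hk.symm)]

lemma gd_filt (k : Char) (f : Char → Nat) : ∀ (K : List Char), K.Nodup →
    ((((K.map (fun a => (a, (f a : Int)))).filter (fun p => p.1 = k)).map (·.2)).sum)
      = if k ∈ K then (f k : Int) else 0 := by
  intro K
  induction K with
  | nil => simp
  | cons a K ih =>
    intro h
    rcases List.nodup_cons.1 h with ⟨ha, hK⟩
    by_cases hak : a = k
    · subst hak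
      rw [List.map_cons, List.filter_cons_of_pos (by simp)]
      simp only [List.map_cons, List.sum_cons, ih hK]
      simp [ha]
    · rw [List.map_cons, List.filter_cons_of_neg (by simpa using hak)]
      rw [ih hK]
      have hka : ¬k = a := fun hk => hak hk.symm
      simp [List.mem_cons, hka]

lemma gd_cast_sum (K : List Char) (f : Char → Nat) :
    (((K.map f).sum : Nat) : Int) = (K.map (fun k => (f k : Int))).sum := by
  induction K with
  | nil => simp
  | cons a K ih => simp [ih]

-- value of A's else-branch: sum of |count1 - count2| over the distinct characters
lemma gd_A_val (w1 w2 : List Char) :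
    (((PySem.Dict.counter w2).items.foldl (fun d p =>
        let d := if d.contains p.1 then d else d.insert p.1 0
        d.insert p.1 (d.getD p.1 0 - p.2)) (PySem.Dict.counter w1)).items.foldl
      (fun r p => r + |p.2|) (0 : Int))
    = ((gdKeys w1 w2).map (fun k => |((List.count k w1 : Int)) - (List.count k w2 : Int)|)).sum := by
  rw [gd_bodyA_eq]
  have hkeys : ((PySem.Dict.counter w2).items.foldl
      (fun d p => d.insert p.1 (d.getD p.1 0 - p.2)) (PySem.Dict.counter w1)).keys = gdKeys w1 w2 := by
    have h := PySem.Dict.keys_foldl_insert_key (κ := Char) (ν := Int)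
      ((PySem.Dict.counter w2).items) Prod.fst (fun d p => d.getD p.1 0 - p.2)
      (PySem.Dict.counter w1)
    simpa [PySem.Dict.items_counter, PySem.Dict.keys_counter, List.map_map, gdKeys,
      Function.comp_def] using h
  have hnd : ((PySem.Dict.counter w2).items.foldl
      (fun d p => d.insert p.1 (d.getD p.1 0 - p.2)) (PySem.Dict.counter w1)).keys.Nodup := by
    rw [hkeys]; exact gdKeys_nodup w1 w2
  have hgd : ∀ k, ((PySem.Dict.counter w2).items.foldl
      (fun d p => d.insert p.1 (d.getD p.1 0 - p.2)) (PySem.Dict.counter w1)).getD k 0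
      = (List.count k w1 : Int) - (List.count k w2 : Int) := by
    intro k
    rw [gd_getD_foldA, PySem.Dict.getD_counter, PySem.Dict.items_counter,
      gd_filt k (fun a => List.count a w2) _ (PySem.Set.nodup_ofList _)]
    by_cases hk : k ∈ w2
    · simp [PySem.Set.mem_ofList, hk]
    · have h0 : List.count k w2 = 0 := List.count_eq_zero.2 hk
      simp [PySem.Set.mem_ofList, hk, h0]
  rw [PySem.Dict.items_eq_map_keys _ hnd 0, PySem.List.foldl_add, hkeys, List.map_map]
  simp only [Function.comp_def, hgd, zero_add]

-- value of B's else-branch: sum of truncated count differences over the same characters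
lemma gd_B_val (w1 w2 : List Char) :
    (((w2.foldl (fun rest c =>
        if rest.contains c then (PySem.List.remove? rest c).getD rest else rest) w1).length : Nat) : Int)
    = ((gdKeys w1 w2).map (fun k => ((List.count k w1 - List.count k w2 : Nat) : Int))).sum := by
  rw [gd_stepB_eq]
  have hsub : ∀ x ∈ (w2.foldl (fun rest c => if c ∈ rest then rest.erase c else rest) w1),
      x ∈ gdKeys w1 w2 := fun x hx => gdKeys_mem_left w1 w2 (gd_memB w2 w1 x hx)
  have hlen := gd_sum_count (gdKeys w1 w2) (gdKeys_nodup w1 w2) _ hsub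
  rw [← hlen, gd_cast_sum]
  congr 1
  apply List.map_congr_left
  intro k _
  rw [gd_countB]

-- the arithmetic core: when total counts agree, half the sum of |c1-c2| is the sum of c1 ⊖ c2
lemma gd_abs_sum (K : List Char) (c1 c2 : Char → Nat)
    (h : (K.map (fun k => (c1 k : Int))).sum = (K.map (fun k => (c2 k : Int))).sum) :
    PySem.Int.floordiv ((K.map (fun k => |(c1 k : Int) - (c2 k : Int)|)).sum) 2
      = (K.map (fun k => ((c1 k - c2 k : Nat) : Int))).sum := by
  have hsplit : ∀ K' : List Char,
      (K'.map (fun k => |(c1 k : Int) - (c2 k : Int)|)).sum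
        = (K'.map (fun k => ((c1 k - c2 k : Nat) : Int))).sum
          + (K'.map (fun k => ((c2 k - c1 k : Nat) : Int))).sum := by
    intro K'
    induction K' with
    | nil => simp
    | cons a K' ih =>
      simp only [List.map_cons, List.sum_cons, ih]
      have habs : |(c1 a : Int) - (c2 a : Int)|
          = ((c1 a - c2 a : Nat) : Int) + ((c2 a - c1 a : Nat) : Int) := by
        rcases le_total (c1 a) (c2 a) with hle | hle
        · rw [abs_of_nonpos (by omega)]; omega
        · rw [abs_of_nonneg (by omega)]; omega
      omega
  have hdiff : ∀ K' : List Char,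
      (K'.map (fun k => ((c1 k - c2 k : Nat) : Int))).sum
          - (K'.map (fun k => ((c2 k - c1 k : Nat) : Int))).sum
        = (K'.map (fun k => (c1 k : Int))).sum - (K'.map (fun k => (c2 k : Int))).sum := by
    intro K'
    induction K' with
    | nil => simp
    | cons a K' ih =>
      simp only [List.map_cons, List.sum_cons]
      omega
  have hPN := hdiff K
  rw [hsplit K]
  rw [PySem.Int.floordiv_eq_ediv_of_pos (by norm_num)]
  omega

-- ===== VERDICT (by name: the statement is the Claim_ definition above) =====
theorem get_dif_spec : Claim_equal_get_dif := by
  intro word1 word2 _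
  unfold Spec_get_dif get_dif get_dif_alt
  by_cases hlen : PySem.Str.len word1 = PySem.Str.len word2
  · rw [if_neg (fun hne => hne hlen), if_neg (fun hne => hne hlen)]
    have hlen' : word1.toList.length = word2.toList.length := by
      have := hlen
      rw [PySem.Str.len_eq, PySem.Str.len_eq] at this
      exact_mod_cast this
    simp only [gd_A_val word1.toList word2.toList, gd_B_val word1.toList word2.toList]
    apply gd_abs_sum
    have h1 := gd_sum_count (gdKeys word1.toList word2.toList)
      (gdKeys_nodup word1.toList word2.toList) word1.toList
      (fun x hx => gdKeys_mem_left _ _ hx)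
    have h2 := gd_sum_count (gdKeys word1.toList word2.toList)
      (gdKeys_nodup word1.toList word2.toList) word2.toList
      (fun x hx => gdKeys_mem_right _ _ hx)
    rw [← gd_cast_sum, ← gd_cast_sum, h1, h2, hlen']
  · rw [if_pos hlen, if_pos hlen]
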